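-- pv_equiv track=rewrite | github.com/ayoni02/DevCareer-DSP-chaneel-codes | 3rd-10-2025/Thursday/Ordered Count of Characters/Main.py | ordered_count
-- ===== SOURCE A (Python) =====
-- def ordered_count(word):
--     from collections import Counter
--     count = Counter(word)
--     # return count.most_common()
--     seen = []
--     for ch in count:
--         if ch not in seen:
--             seen.append(ch)
--     return [(ch, count[ch]) for ch in seen]
-- ===== SOURCE B (Python) =====
-- def ordered_count(word):
--     chars = list(word)
--     result = []
--     while chars:
--         ch = chars[0]
--         result.append((ch, chars.count(ch)))
--         chars = [c for c in chars if c != ch]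
--     return result
-- ===== Notes on version B (the rewrite author's own statement) =====
-- stated objective: alternative
-- what changed: Replaces Counter plus a dedup loop and a comprehension by repeated extraction: take the first remaining character, count its occurrences in the remaining list, then filter all its copies out and repeat, using no dict/Counter at all.
import Mathlib
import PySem

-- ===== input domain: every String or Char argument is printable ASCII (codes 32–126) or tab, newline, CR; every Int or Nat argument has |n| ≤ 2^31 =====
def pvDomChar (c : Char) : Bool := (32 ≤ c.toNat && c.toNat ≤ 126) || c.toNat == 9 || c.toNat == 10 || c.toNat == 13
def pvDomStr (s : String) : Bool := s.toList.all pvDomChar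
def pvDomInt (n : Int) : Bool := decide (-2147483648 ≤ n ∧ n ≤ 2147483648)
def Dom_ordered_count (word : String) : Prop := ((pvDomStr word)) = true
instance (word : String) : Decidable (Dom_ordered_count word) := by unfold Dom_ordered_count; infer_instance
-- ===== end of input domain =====

-- B drops Counter/dict entirely: it repeatedly takes the first remaining character,
-- counts it in the remaining list, filters all its copies out and repeats (alternative algorithm).


-- ===== PORT A =====
def ordered_count (word : String) : List (String × Int) :=
  -- count = Counter(word)
  let count := PySem.Dict.counter word.toList
  -- seen = []; for ch in count: if ch not in seen: seen.append(ch)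
  let seen := count.keys.foldl (fun seen ch => if seen.contains ch then seen else seen ++ [ch]) []
  -- [(ch, count[ch]) for ch in seen]
  seen.map (fun ch => (ch.toString, count.getD ch 0))

-- ===== PORT B =====
-- while chars: ch = chars[0]; result.append((ch, chars.count(ch))); chars = [c for c in chars if c != ch]
def ocLoop (chars : List Char) (result : List (String × Int)) : List (String × Int) :=
  match chars with
  | [] => result
  | ch :: rest =>
      ocLoop ((ch :: rest).filter (fun c => c != ch))
             (result ++ [(ch.toString, ((ch :: rest).count ch : Int))])
termination_by chars.length
decreasing_by
  simp only [List.filter_cons, bne_self_eq_false, Bool.false_eq_true, if_false]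
  exact Nat.lt_succ_of_le (List.length_filter_le _ _)

def ordered_count_alt (word : String) : List (String × Int) :=
  -- chars = list(word); result = []; while chars: … ; return result
  ocLoop word.toList []

-- ===== PRECONDITION & SPEC =====
def Spec_ordered_count (word : String) (out : List (String × Int)) : Prop := out = ordered_count_alt word
instance (word : String) (out : List (String × Int)) : Decidable (Spec_ordered_count word out) := by unfold Spec_ordered_count; infer_instance

-- ===== CLAIM (what is proved, stated in full; the proofs are below) =====
def Claim_equal_ordered_count : Prop := ∀ (word : String), Dom_ordered_count word → Spec_ordered_count word (ordered_count word)

-- ===== LEMMAS AND PROOFS =====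

-- A's dedup loop over an already-Nodup list returns the list itself.
theorem foldl_add_of_nodup {α : Type} [BEq α] [LawfulBEq α] (l : List α)
    (h : l.Nodup) (acc : List α) (hd : ∀ x ∈ acc, x ∉ l) :
    l.foldl (fun seen ch => if seen.contains ch then seen else seen ++ [ch]) acc = acc ++ l := by
  induction l generalizing acc with
  | nil => simp
  | cons a t ih =>
    simp only [List.foldl_cons]
    have hna : acc.contains a = false := by
      rw [Bool.eq_false_iff]
      intro hc
      exact hd a (by simpa using hc) (by simp)
    rw [hna]
    simp only [Bool.false_eq_true, if_false]
    rw [ih (List.Nodup.of_cons h) (acc ++ [a])]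
    · simp
    · intro x hx
      rcases List.mem_append.mp hx with h1 | h1
      · intro hxt; exact hd x h1 (List.mem_cons_of_mem _ hxt)
      · simp only [List.mem_singleton] at h1
        subst h1
        exact (List.nodup_cons.mp h).1

-- Folding Set.add over l ignores elements the accumulator already contains.
theorem foldl_add_filter_seen {α : Type} [BEq α] [LawfulBEq α] (l : List α) (acc : PySem.Set α)
    (a : α) (h : acc.contains a = true) :
    l.foldl PySem.Set.add acc = (l.filter (fun c => c != a)).foldl PySem.Set.add acc := by
  induction l generalizing acc with
  | nil => rfl
  | cons x t ih =>
    by_cases hx : x = a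
    · subst hx
      simp only [List.filter_cons, bne_self_eq_false, Bool.false_eq_true, if_false,
        List.foldl_cons, PySem.Set.add, h, if_true]
      exact ih acc h
    · have hbne : (x != a) = true := by simpa using hx
      simp only [List.filter_cons, hbne, if_true, List.foldl_cons]
      apply ih
      simp only [PySem.Set.add]
      split
      · exact h
      · simpa using Or.inl (by simpa using h)

-- A fresh element sitting first in the accumulator can be pulled out of the fold.
theorem foldl_add_cons_acc {α : Type} [BEq α] [LawfulBEq α] (l : List α) (acc : PySem.Set α)
    (a : α) (h : a ∉ l) :
    l.foldl PySem.Set.add (a :: acc) = a :: l.foldl PySem.Set.add acc := by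
  induction l generalizing acc with
  | nil => rfl
  | cons x t ih =>
    have hne : x ≠ a := fun he => h (he ▸ List.mem_cons_self)
    have hxa : PySem.Set.contains (a :: acc) x = acc.contains x := by
      simp [PySem.Set.contains, hne]
    simp only [List.foldl_cons, PySem.Set.add, hxa]
    by_cases hacc : acc.contains x = true
    · rw [if_pos hacc, if_pos hacc]
      exact ih acc (fun hm => h (List.mem_cons_of_mem _ hm))
    · rw [if_neg hacc, if_neg hacc, List.cons_append]
      exact ih (acc ++ [x]) (fun hm => h (List.mem_cons_of_mem _ hm))

-- First-occurrence dedup of a cons: head, then dedup of the tail with the head filtered out.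
theorem ofList_cons_filter {α : Type} [BEq α] [LawfulBEq α] (a : α) (l : List α) :
    PySem.Set.ofList (a :: l) = a :: PySem.Set.ofList (l.filter (fun c => c != a)) := by
  have h1 : PySem.Set.ofList (a :: l) = l.foldl PySem.Set.add [a] := by
    simp [PySem.Set.ofList, PySem.Set.add, PySem.Set.empty]
  rw [h1, foldl_add_filter_seen l [a] a (by simp)]
  rw [foldl_add_cons_acc _ _ _ (by simp)]
  rfl

-- B's loop produces exactly the first-occurrence-ordered (char, global count) pairs.
theorem ocLoop_eq_canon (cs : List Char) (res : List (String × Int)) :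
    ocLoop cs res =
      res ++ (PySem.Set.ofList cs).map (fun c => (c.toString, (cs.count c : Int))) := by
  induction hn : cs.length using Nat.strong_induction_on generalizing cs res with
  | _ n ih =>
    match cs with
    | [] => simp [ocLoop]
    | ch :: rest =>
      rw [ocLoop]
      simp only [List.filter_cons, bne_self_eq_false, Bool.false_eq_true, if_false]
      have hlen : (rest.filter (fun c => c != ch)).length < n := by
        subst hn
        exact Nat.lt_succ_of_le (List.length_filter_le _ _)
      rw [ih _ hlen _ _ rfl]
      rw [ofList_cons_filter]
      simp only [List.map_cons, List.append_assoc, List.singleton_append]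
      congr 1
      congr 1
      apply List.map_congr_left
      intro c hc
      have hcne : c ≠ ch := by
        have : c ∈ rest.filter (fun c => c != ch) := by
          have := (PySem.Set.mem_ofList _ _).mp hc
          exact this
        simpa using (List.mem_filter.mp this).2
      have h1 : ∀ t : List Char, (t.filter (fun c => c != ch)).count c = t.count c := by
        intro t
        induction t with
        | nil => rfl
        | cons x t iht =>
          by_cases hx : x = ch
          · subst hx
            simp only [List.filter_cons, bne_self_eq_false, Bool.false_eq_true, if_false, iht]
            simp [Ne.symm hcne]
          · have hbne : (x != ch) = true := by simpa using hx
            simp only [List.filter_cons, hbne, if_true]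
            simp [List.count_cons, iht]
      have hcount : (rest.filter (fun c => c != ch)).count c = (ch :: rest).count c := by
        rw [h1 rest]
        simp [Ne.symm hcne]
      rw [hcount]

-- ===== VERDICT (by name: the statement is the Claim_ definition above) =====
theorem ordered_count_spec : Claim_equal_ordered_count := by
  intro word _
  unfold Spec_ordered_count ordered_count ordered_count_alt
  dsimp only
  rw [PySem.Dict.keys_counter,
    foldl_add_of_nodup _ (PySem.Set.nodup_ofList _) [] (by simp),
    ocLoop_eq_canon]
  simp only [List.nil_append]
  apply List.map_congr_left
  intro c _
  simp [PySem.Dict.getD_counter]
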